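-- pv_equiv track=rewrite | github.com/HasanDGursoy/Python_Zero_To_Hero | 12-Dictionary/dict_and_list.py | harf_listele
-- ===== SOURCE A (Python) =====
-- def harf_say(metin):
--     harfler = dict()
--
--     for harf in metin:
--
--         # harf istediğimiz için --> isalpha()
--
--         if harf.isalpha():
--
--             # harf'i harfler sözlüğüne ekle --> içinde var mı ?
--             # varsa değeri 1 arttır.
--             if harf in harfler.keys():
--                 harfler[harf] += 1
--             else:
--                 # yoksa , ilk defa geliyordur -> değeri ile eklenecek
--                 harfler[harf] = 1
--
--     return harfler
--
-- def harf_listele(metin):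
--     # önce metin verip sözlük alalım
--
--     sozluk = harf_say(metin)
--
--     # boş sözlük yaratalım
--
--     harfler = dict()
--
--     for key in sozluk:
--
--         # değerini alalım
--         deger = sozluk[key]
--
--         # bu değer daha önceden harflere eklenmişmi ?
--         # in ifadesi ile kontrol et
--
--         if deger not in harfler:
--
--             # yoksa ekle --> liste olarak eklicez bu sefer : []
--             harfler[deger] = [key]
--
--         else:
--             harfler[deger].append(key)
--
--     return harfler
-- ===== SOURCE B (Python) =====
-- def harf_listele(metin):
--     # letters of the text, in order
--     letters = [h for h in metin if h.isalpha()]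
--     # distinct letters in first-appearance order
--     order = list(dict.fromkeys(letters))
--     # frequency of each distinct letter
--     counts = [letters.count(h) for h in order]
--     # group letters by frequency: distinct counts in first-appearance order,
--     # each mapped to the letters having that count
--     return {c: [h for h, k in zip(order, counts) if k == c]
--             for c in dict.fromkeys(counts)}
-- ===== Notes on version B (the rewrite author's own statement) =====
-- stated objective: alternative
-- what changed: Replaced A's two incremental dict-building loops (count dict, then single-pass inversion with in-place appends) by a declarative pipeline: filter letters, dedup for first-appearance order, per-letter list.count, and a group-by-filter comprehension over the distinct counts.
import Mathlib
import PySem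

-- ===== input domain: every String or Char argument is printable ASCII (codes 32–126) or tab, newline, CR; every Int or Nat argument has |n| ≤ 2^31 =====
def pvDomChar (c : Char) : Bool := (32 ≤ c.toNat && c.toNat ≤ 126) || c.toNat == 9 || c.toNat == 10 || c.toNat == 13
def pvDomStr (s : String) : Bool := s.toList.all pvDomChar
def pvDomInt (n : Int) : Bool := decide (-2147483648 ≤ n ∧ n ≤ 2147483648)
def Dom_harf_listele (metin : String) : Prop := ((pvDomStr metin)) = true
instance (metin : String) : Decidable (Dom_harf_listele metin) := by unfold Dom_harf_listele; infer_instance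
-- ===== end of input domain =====

-- B replaces A's two incremental dict-building loops by a dedup/count/filter group-by pipeline (alternative decomposition, same results).
-- ===== PORT A =====
def harf_say (metin : String) : PySem.Dict String Int :=
  metin.toList.foldl (fun harfler harf =>
    if PySem.Chars.isalpha harf then
      let h := String.ofList [harf]
      if harfler.contains h then harfler.insert h (harfler.getD h 0 + 1)
      else harfler.insert h 1
    else harfler) PySem.Dict.empty

def harf_listele (metin : String) : List (Int × List String) :=
  let sozluk := harf_say metin
  let harfler : PySem.Dict Int (List String) :=
    sozluk.keys.foldl (fun harfler key =>
      let deger := sozluk.getD key 0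
      if ¬ harfler.contains deger then harfler.insert deger [key]
      else harfler.modify deger [] (· ++ [key])) PySem.Dict.empty
  harfler.items

-- ===== PORT B =====
def harf_listele_alt (metin : String) : List (Int × List String) :=
  let letters := (metin.toList.filter PySem.Chars.isalpha).map (fun c => String.ofList [c])
  let order := PySem.List.dedup letters
  let counts := order.map (fun h => (letters.count h : Int))
  (PySem.List.dedup counts).map (fun c =>
    (c, ((order.zip counts).filter (fun p => p.2 == c)).map (·.1)))

-- ===== PRECONDITION & SPEC =====
def Spec_harf_listele (metin : String) (out : List (Int × List String)) : Prop := out = harf_listele_alt metin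
instance (metin : String) (out : List (Int × List String)) : Decidable (Spec_harf_listele metin out) := by unfold Spec_harf_listele; infer_instance

-- ===== CLAIM (what is proved, stated in full; the proofs are below) =====
def Claim_equal_harf_listele : Prop := ∀ (metin : String), Dom_harf_listele metin → Spec_harf_listele metin (harf_listele metin)

-- ===== LEMMAS AND PROOFS =====

-- A's increment step (branch on membership) is the uniform getD-based insert step.
theorem say_step_eq :
    (fun (d : PySem.Dict String Int) (c : Char) =>
      if PySem.Chars.isalpha c then
        let h := String.ofList [c]
        if d.contains h then d.insert h (d.getD h 0 + 1) else d.insert h 1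
      else d)
    = fun (d : PySem.Dict String Int) (c : Char) =>
      if PySem.Chars.isalpha c then d.insert (String.ofList [c]) (d.getD (String.ofList [c]) 0 + 1)
      else d := by
  funext d c
  by_cases ha : PySem.Chars.isalpha c
  · simp only [ha, if_true]
    cases hc : d.contains (String.ofList [c]) with
    | true => simp
    | false => simp [PySem.Dict.getD_of_not_contains (h := hc)]
  · simp [ha]

-- A's counting dict is Counter of the letters extracted in order.
theorem say_eq (metin : String) :
    harf_say metin
      = PySem.Dict.counter ((metin.toList.filter PySem.Chars.isalpha).map (fun c => String.ofList [c])) := by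
  rw [← PySem.Dict.foldl_insert_getD_add_one_eq_counter, List.foldl_map, List.foldl_filter]
  unfold harf_say
  rw [say_step_eq]

-- A's grouping step (branch on membership) is the uniform modify step.
theorem group_step_eq (g : String → Int) :
    (fun (d : PySem.Dict Int (List String)) (key : String) =>
      if ¬ d.contains (g key) then d.insert (g key) [key]
      else d.modify (g key) [] (· ++ [key]))
    = fun (d : PySem.Dict Int (List String)) (key : String) =>
      d.modify (g key) [] (· ++ [key]) := by
  funext d key
  cases hc : d.contains (g key) with
  | true => simp
  | false =>
      simp only [Bool.false_eq_true, not_false_iff, if_true]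
      unfold PySem.Dict.modify
      rw [PySem.Dict.getD_of_not_contains (h := hc)]
      simp

-- The items produced by A's grouping loop, in closed form.
theorem group_items (order : List String) (g : String → Int) :
    (order.foldl (fun (d : PySem.Dict Int (List String)) key =>
        if ¬ d.contains (g key) then d.insert (g key) [key]
        else d.modify (g key) [] (· ++ [key])) PySem.Dict.empty).items
    = (PySem.List.dedup (order.map g)).map
        (fun c => (c, order.filter (fun k => g k == c))) := by
  rw [group_step_eq]
  have hfold : order.foldl (fun (d : PySem.Dict Int (List String)) key =>
        d.modify (g key) [] (· ++ [key])) PySem.Dict.empty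
      = (order.map (fun k => (g k, k))).foldl
          (fun (d : PySem.Dict Int (List String)) p => d.modify p.1 [] (· ++ [p.2]))
          PySem.Dict.empty := by
    rw [List.foldl_map]
  rw [hfold]
  have hnd : ((order.map (fun k => (g k, k))).foldl
      (fun (d : PySem.Dict Int (List String)) p => d.modify p.1 [] (· ++ [p.2]))
      PySem.Dict.empty).keys.Nodup := by
    exact PySem.Dict.nodup_keys_foldl_modify_key _ _ _ _ _ PySem.Dict.nodup_keys_empty
  rw [PySem.Dict.items_eq_map_keys _ hnd []]
  rw [PySem.Dict.keys_foldl_modify_key]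
  simp only [PySem.Dict.keys_empty, PySem.Set.update_nil_left, ← PySem.List.dedup_eq_ofList,
    List.map_map, PySem.Dict.getD_foldl_modify_append, PySem.Dict.getD_empty, List.nil_append,
    List.filter_map, Function.comp_def, List.map_id']

theorem zip_map_self {α β : Type} (l : List α) (f : α → β) :
    l.zip (l.map f) = l.map (fun a => (a, f a)) := by
  induction l with
  | nil => rfl
  | cons x xs ih => simp [ih]

-- ===== VERDICT (by name: the statement is the Claim_ definition above) =====
theorem harf_listele_spec : Claim_equal_harf_listele := by
  unfold Claim_equal_harf_listele
  intro metin _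
  unfold Spec_harf_listele harf_listele harf_listele_alt
  rw [say_eq]
  rw [group_items ((PySem.Dict.counter ((metin.toList.filter PySem.Chars.isalpha).map (fun c => String.ofList [c]))).keys)
        (fun key => (PySem.Dict.counter ((metin.toList.filter PySem.Chars.isalpha).map (fun c => String.ofList [c]))).getD key 0)]
  simp only [PySem.Dict.getD_counter, PySem.Dict.keys_counter, ← PySem.List.dedup_eq_ofList,
    zip_map_self, List.filter_map, List.map_map, Function.comp_def, List.map_id']
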